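-- pv_equiv track=rewrite | github.com/ollien/advent-of-code-2019 | day16/py/main.py | stretch_pattern
-- ===== SOURCE A (Python) =====
-- import math
-- from typing import Tuple, List
--
-- BASE_PATTERN = (0, 1, 0, -1)
--
-- def stretch_pattern(i: int, length: int) -> Tuple[int, ...]:
--     pattern = []
--     for item in BASE_PATTERN:
--         pattern += [item] * min(i + 1, length)
--         if len(pattern) >= length:
--             break
--
--     trimmed_pattern = pattern[:length]
--     if len(trimmed_pattern) < length:
--         trimmed_pattern = trimmed_pattern * int(math.ceil((length / len(trimmed_pattern))))
--         trimmed_pattern = trimmed_pattern[:length]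
--
--     return trimmed_pattern
-- ===== SOURCE B (Python) =====
-- BASE_PATTERN = (0, 1, 0, -1)
--
--
-- def stretch_pattern(i: int, length: int):
--     # Each output element j is the base pattern entry at (j // (i+1)) % 4:
--     # a closed per-index formula instead of building, tiling and trimming blocks.
--     return [BASE_PATTERN[(j // (i + 1)) % 4] for j in range(length)]
-- ===== Notes on version B (the rewrite author's own statement) =====
-- stated objective: simpler
-- what changed: Replaces A's build-one-stretched-cycle-then-tile-and-trim strategy by a single comprehension computing each element directly as BASE_PATTERN[(j // (i+1)) % 4].
-- outside the precondition, e.g. on stretch_pattern(-2, 2): A raises ZeroDivisionError, B returns [0, -1]; on stretch_pattern(-1, 1): A raises ZeroDivisionError, B raises ZeroDivisionError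
import Mathlib
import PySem

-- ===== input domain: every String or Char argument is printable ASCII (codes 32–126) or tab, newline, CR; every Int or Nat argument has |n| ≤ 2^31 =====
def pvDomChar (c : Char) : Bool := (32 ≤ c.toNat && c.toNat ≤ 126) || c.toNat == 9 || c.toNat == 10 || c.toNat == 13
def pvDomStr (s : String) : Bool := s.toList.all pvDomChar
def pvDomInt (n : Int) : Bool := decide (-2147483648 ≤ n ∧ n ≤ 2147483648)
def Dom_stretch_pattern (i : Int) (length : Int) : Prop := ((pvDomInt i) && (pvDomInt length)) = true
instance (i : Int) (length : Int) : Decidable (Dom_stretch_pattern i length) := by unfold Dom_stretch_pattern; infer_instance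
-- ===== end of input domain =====

-- B replaces A's build-one-cycle-then-tile-and-trim loop by a single per-index
-- formula BASE_PATTERN[(j // (i+1)) % 4]; objective: simpler.

-- ===== PORT A =====
-- BASE_PATTERN = (0, 1, 0, -1)
def pvBASE : List Int := [0, 1, 0, -1]

-- 'for item in BASE_PATTERN: pattern += [item] * min(i+1, length); if len(pattern) >= length: break'
-- ([x] * n is empty for n ≤ 0, hence Int.toNat)
def pvBuildA : List Int → List Int → Int → Int → List Int
  | [], pattern, _, _ => pattern
  | item :: rest, pattern, i, length =>
    let pattern' := pattern ++ List.replicate (min (i + 1) length).toNat item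
    if length ≤ (pattern'.length : Int) then pattern'
    else pvBuildA rest pattern' i length

def stretch_pattern (i : Int) (length : Int) : List Int :=
  let pattern := pvBuildA pvBASE [] i length
  let trimmed := PySem.List.slice pattern none (some length)
  if (trimmed.length : Int) < length then
    -- int(math.ceil(length / len(trimmed))): exact ceiling division on Dom
    -- (|ints| ≤ 2^31 < 2^53, so the float division rounds to the same ceiling);
    -- len(trimmed) = 0 raises ZeroDivisionError in Python — excluded by Pre_.
    let n : Int := -(PySem.Int.floordiv (-length) (trimmed.length : Int))
    let tiled := (List.replicate n.toNat trimmed).flatten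
    PySem.List.slice tiled none (some length)
  else trimmed

-- ===== PORT B =====
def stretch_pattern_alt (i : Int) (length : Int) : List Int :=
  (PySem.List.pyRange 0 length 1).map (fun j =>
    PySem.List.pyGetD pvBASE (PySem.Int.mod (PySem.Int.floordiv j (i + 1)) 4) 0)

-- ===== PRECONDITION & SPEC =====
-- Pre_ excludes exactly the inputs where A raises ZeroDivisionError: i < 0 with length > 0
-- (the stretched cycle is empty there, so A divides by len([]) = 0).
def Pre_stretch_pattern (i : Int) (length : Int) : Prop := 0 ≤ i ∨ length ≤ 0
instance (i : Int) (length : Int) : Decidable (Pre_stretch_pattern i length) := by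
  unfold Pre_stretch_pattern; infer_instance

def pvWitness_stretch_pattern : Int × Int := (1, 7)

def Spec_stretch_pattern (i : Int) (length : Int) (out : List Int) : Prop := out = stretch_pattern_alt i length
instance (i : Int) (length : Int) (out : List Int) : Decidable (Spec_stretch_pattern i length out) := by
  unfold Spec_stretch_pattern; infer_instance

-- ===== CLAIM (what is proved, stated in full; the proofs are below) =====
def Claim_equal_stretch_pattern : Prop := ∀ (i : Int) (length : Int), Dom_stretch_pattern i length → Pre_stretch_pattern i length → Spec_stretch_pattern i length (stretch_pattern i length)

-- ===== LEMMAS AND PROOFS =====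

theorem pv_getD_map_range (g : Nat → Int) (n t : Nat) (h : t < n) :
    ((List.range n).map g).getD t 0 = g t := by
  rw [List.getD_eq_getElem _ _ (by simpa using h)]
  simp

theorem pv_range_map_div (K n : Nat) (g : Nat → Int) :
    (List.range (n * K)).map (fun j => g (j / K)) =
      ((List.range n).map (fun r => List.replicate K (g r))).flatten := by
  induction n with
  | zero => simp
  | succ n ih =>
    rw [List.range_succ, Nat.succ_mul, List.range_add, List.map_append, List.map_append, ih,
      List.flatten_append]
    congr 1
    simp only [List.flatten, List.map_cons, List.map_nil, List.flatten_cons,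
      List.append_nil, List.map_map]
    rcases Nat.eq_zero_or_pos K with hK | hK
    · simp [hK]
    · apply List.ext_getElem
      · simp
      · intro j h1 h2
        simp only [List.getElem_map, List.getElem_range, Function.comp_apply,
          List.getElem_replicate]
        congr 1
        have hj : j < K := by simpa using h1
        rw [Nat.mul_comm n K, Nat.mul_add_div hK, Nat.div_eq_of_lt hj]; rfl

theorem pv_flatten_replicate (c : Nat) (p : List Int) :
    (List.replicate c p).flatten =
      (List.range (c * p.length)).map (fun j => p.getD (j % p.length) 0) := by
  induction c with
  | zero => simp
  | succ c ih =>
    rw [List.replicate_succ, List.flatten_cons, Nat.succ_mul, Nat.add_comm, List.range_add,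
      List.map_append, ih]
    congr 1
    · apply List.ext_getElem
      · simp
      · intro j h1 h2
        have hj : j < p.length := h1
        simp [Nat.mod_eq_of_lt hj, List.getElem?_eq_getElem hj]
    · rw [List.map_map]
      apply List.map_congr_left
      intro a _
      simp [Nat.add_mod_left]

def pvG (K : Nat) : Nat → Int := fun j => pvBASE.getD (j / K) 0

theorem pvG_blocks (K n : Nat) :
    (List.range (n * K)).map (pvG K) =
      ((List.range n).map (fun r => List.replicate K (pvBASE.getD r 0))).flatten :=
  pv_range_map_div K n (fun t => pvBASE.getD t 0)

theorem pvG_two (K : Nat) : (List.range (2 * K)).map (pvG K) =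
    List.replicate K 0 ++ List.replicate K 1 := by
  rw [pvG_blocks]; simp [List.range_succ, pvBASE]

theorem pvG_three (K : Nat) : (List.range (3 * K)).map (pvG K) =
    (List.replicate K 0 ++ List.replicate K 1) ++ List.replicate K 0 := by
  rw [pvG_blocks]; simp [List.range_succ, pvBASE]

theorem pvG_four (K : Nat) : (List.range (4 * K)).map (pvG K) =
    ((List.replicate K 0 ++ List.replicate K 1) ++ List.replicate K 0) ++ List.replicate K (-1) := by
  rw [pvG_blocks]; simp [List.range_succ, pvBASE]

theorem pv_alt_char (i length : Int) (hi : 0 ≤ i) :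
    stretch_pattern_alt i length =
      (List.range length.toNat).map (fun t => pvBASE.getD ((t / (i + 1).toNat) % 4) 0) := by
  have hK : (((i + 1).toNat : Nat) : Int) = i + 1 := by omega
  simp only [stretch_pattern_alt, PySem.List.pyRange_one, Int.sub_zero, List.map_map]
  apply List.map_congr_left
  intro t _
  simp only [Function.comp_apply, zero_add]
  rw [← hK, PySem.Int.floordiv_natCast]
  rw [show (4 : Int) = ((4 : Nat) : Int) from rfl, PySem.Int.mod_natCast]
  simp only [PySem.List.pyGetD_natCast, Int.toNat_natCast]

theorem pvG_eq_mod (K t : Nat) (hK : 0 < K) (ht : t < 4 * K) :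
    pvG K t = pvBASE.getD ((t / K) % 4) 0 := by
  simp only [pvG]
  rw [Nat.mod_eq_of_lt ((Nat.div_lt_iff_lt_mul hK).mpr ht)]

theorem pv_trim (i length : Int) (K r : Nat) (hL : 0 ≤ length)
    (hpat : pvBuildA pvBASE [] i length = (List.range (r * K)).map (pvG K))
    (hle : length.toNat ≤ r * K) :
    stretch_pattern i length = (List.range length.toNat).map (pvG K) := by
  have htake : PySem.List.slice (pvBuildA pvBASE [] i length) none (some length) =
      (List.range length.toNat).map (pvG K) := by
    rw [hpat, PySem.List.slice_to _ hL, ← List.map_take, List.take_range, Nat.min_eq_left hle]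
  simp only [stretch_pattern]
  rw [htake]
  simp only [List.length_map, List.length_range]
  rw [if_neg (by omega)]

theorem pv_main (i length : Int) (hpre : 0 ≤ i ∨ length ≤ 0) :
    stretch_pattern i length = stretch_pattern_alt i length := by
  by_cases hL : length ≤ 0
  · have hmin : (min (i + 1) length).toNat = 0 := by omega
    have hA : stretch_pattern i length = [] := by
      simp only [stretch_pattern, pvBASE, pvBuildA, hmin, List.replicate_zero, List.append_nil,
        List.length_nil, Nat.cast_zero]
      rw [if_pos hL]
      have hnil : PySem.List.slice ([] : List Int) none (some length) = [] := by
        simp [PySem.List.slice]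
      rw [hnil]
      simp only [List.length_nil, Nat.cast_zero]
      rw [if_neg (by omega)]
    have hB : stretch_pattern_alt i length = [] := by
      rw [stretch_pattern_alt, PySem.List.pyRange_one_eq_nil hL]
      rfl
    rw [hA, hB]
  · have hi : 0 ≤ i := by omega
    have hL0 : 0 < length := by omega
    have hK0 : 0 < (i + 1).toNat := by omega
    rw [pv_alt_char i length hi]
    by_cases h1 : length ≤ i + 1
    · -- first block already covers everything: all zeros
      have hmin : (min (i + 1) length).toNat = length.toNat := by omega
      have hA : stretch_pattern i length = List.replicate length.toNat 0 := by
        simp only [stretch_pattern, pvBASE, pvBuildA, hmin, List.nil_append,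
          List.length_replicate]
        rw [if_pos (by omega : length ≤ (length.toNat : Int))]
        rw [PySem.List.slice_to _ (by omega)]
        rw [List.take_replicate]
        simp only [Nat.min_self, List.length_replicate]
        rw [if_neg (by omega)]
      rw [hA]
      apply List.ext_getElem
      · simp
      · intro t h1t h2t
        have ht : t < length.toNat := by simpa using h1t
        have hdiv : t / (i + 1).toNat = 0 := Nat.div_eq_of_lt (by omega)
        simp [hdiv, pvBASE]
    · -- i + 1 < length: blocks of width K = (i+1).toNat
      have hmin : (min (i + 1) length).toNat = (i + 1).toNat := by omega
      by_cases c2 : length ≤ 2 * (i + 1)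
      · have hpat : pvBuildA pvBASE [] i length =
            (List.range (2 * (i + 1).toNat)).map (pvG (i + 1).toNat) := by
          simp only [pvBuildA, pvBASE, hmin, List.nil_append, List.length_append,
            List.length_replicate]
          rw [if_neg (by omega), if_pos (by push_cast; omega)]
          exact (pvG_two _).symm
        rw [pv_trim i length _ 2 (by omega) hpat (by omega)]
        apply List.map_congr_left
        intro t ht
        exact pvG_eq_mod _ t hK0 (by simp at ht; omega)
      · by_cases c3 : length ≤ 3 * (i + 1)
        · have hpat : pvBuildA pvBASE [] i length =
              (List.range (3 * (i + 1).toNat)).map (pvG (i + 1).toNat) := by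
            simp only [pvBuildA, pvBASE, hmin, List.nil_append, List.length_append,
              List.length_replicate]
            rw [if_neg (by omega), if_neg (by push_cast; omega),
              if_pos (by push_cast; omega)]
            exact (pvG_three _).symm
          rw [pv_trim i length _ 3 (by omega) hpat (by omega)]
          apply List.map_congr_left
          intro t ht
          exact pvG_eq_mod _ t hK0 (by simp at ht; omega)
        · have hpat : pvBuildA pvBASE [] i length =
              (List.range (4 * (i + 1).toNat)).map (pvG (i + 1).toNat) := by
            simp only [pvBuildA, pvBASE, hmin, List.nil_append, List.length_append,
              List.length_replicate]
            rw [if_neg (by omega), if_neg (by push_cast; omega),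
              if_neg (by push_cast; omega), ite_self]
            exact (pvG_four _).symm
          by_cases c4 : length ≤ 4 * (i + 1)
          · rw [pv_trim i length _ 4 (by omega) hpat (by omega)]
            apply List.map_congr_left
            intro t ht
            exact pvG_eq_mod _ t hK0 (by simp at ht; omega)
          · -- tiling branch
            simp only [stretch_pattern]
            rw [hpat, PySem.List.slice_to _ (by omega),
              List.take_of_length_le (by simp only [List.length_map, List.length_range]; omega)]
            simp only [List.length_map, List.length_range]
            rw [if_pos (by push_cast; omega)]
            set nn : Int :=
              -(PySem.Int.floordiv (-length) ((4 * (i + 1).toNat : Nat) : Int)) with hnn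
            have hb : (0 : Int) < ((4 * (i + 1).toNat : Nat) : Int) := by push_cast; omega
            have hq := (PySem.Int.neg_floordiv_neg_eq_iff_of_pos hb).mp hnn.symm
            obtain ⟨hq1, hq2⟩ := hq
            have hnpos : 0 < nn := by nlinarith
            have hmin2 : length.toNat ≤ nn.toNat * (4 * (i + 1).toNat) := by
              have h' : ((length.toNat : Nat) : Int) ≤
                  ((nn.toNat * (4 * (i + 1).toNat) : Nat) : Int) := by
                push_cast [Int.toNat_of_nonneg hnpos.le]
                push_cast at hq2
                omega
              exact_mod_cast h'
            rw [pv_flatten_replicate]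
            simp only [List.length_map, List.length_range]
            rw [PySem.List.slice_to _ (by omega), ← List.map_take, List.take_range,
              Nat.min_eq_left hmin2]
            apply List.map_congr_left
            intro j hj
            rw [pv_getD_map_range _ _ _ (Nat.mod_lt _ (by omega))]
            show pvBASE.getD (j % (4 * (i + 1).toNat) / (i + 1).toNat) 0 = _
            rw [show 4 * (i + 1).toNat = (i + 1).toNat * 4 from Nat.mul_comm 4 _,
              Nat.mod_mul_right_div_self]

-- ===== VERDICT (by name: the statement is the Claim_ definition above) =====
theorem stretch_pattern_spec : Claim_equal_stretch_pattern := by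
  intro i length _ hpre
  unfold Spec_stretch_pattern
  unfold Pre_stretch_pattern at hpre
  exact pv_main i length hpre
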